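-- pv_equiv track=rewrite | github.com/oluwasegun5/intelligent_python | pythonProject1/praize_zion/pratice.py | another
-- ===== SOURCE A (Python) =====
-- def another(array: list) -> list:
--     i = 0
--     temp = []
--     while i < len(array) - 1:
--         if len(temp) == 0:
--             temp.append(array[i])
--         else:
--             if array[i] > temp[-1]:
--                 temp.append(array[i])
--         i += 1
--
--     return temp
-- ===== SOURCE B (Python) =====
-- def another(array: list) -> list:
--     # Two passes: build the running-maximum table of array[:-1],
--     # then keep the change points (first element and every strict increase).
--     prefix = array[:-1]
--     r = []
--     m = None
--     for x in prefix:
--         m = x if m is None or x > m else m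
--         r.append(m)
--     out = []
--     for i, v in enumerate(r):
--         if i == 0 or v != r[i - 1]:
--             out.append(v)
--     return out
-- ===== Notes on version B (the rewrite author's own statement) =====
-- stated objective: alternative
-- what changed: Replaces the single index-driven greedy 'append if greater than last kept' while-loop with two separate passes: first build the running-maximum table of array[:-1], then filter it down to its change points.
import Mathlib
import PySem

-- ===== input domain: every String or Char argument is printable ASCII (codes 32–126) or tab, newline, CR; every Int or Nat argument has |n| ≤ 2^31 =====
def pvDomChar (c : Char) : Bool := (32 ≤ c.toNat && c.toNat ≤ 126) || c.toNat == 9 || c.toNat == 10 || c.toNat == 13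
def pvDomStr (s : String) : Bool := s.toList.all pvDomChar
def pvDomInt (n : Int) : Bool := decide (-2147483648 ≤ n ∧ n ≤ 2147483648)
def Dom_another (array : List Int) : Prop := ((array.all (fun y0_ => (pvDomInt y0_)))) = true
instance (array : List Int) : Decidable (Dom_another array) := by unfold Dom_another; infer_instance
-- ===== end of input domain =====

-- B replaces A's single greedy while-loop with two passes (running-max table, then change-point filter); return values agree on all inputs.

-- ===== PORT A =====
-- while i < len(array) - 1: append array[i] if temp empty or array[i] > temp[-1]
-- array[i] and temp[-1] are always in range at their use sites (i < len-1; temp nonempty), so .getD 0 never fires.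
def anotherGo (array : List Int) (i : Nat) (temp : List Int) : List Int :=
  if _h : (i : Int) < (array.length : Int) - 1 then
    let temp' :=
      if temp.length = 0 then temp ++ [(PySem.List.pyGet? array (i : Int)).getD 0]
      else if (PySem.List.pyGet? array (i : Int)).getD 0 > (PySem.List.pyGet? temp (-1)).getD 0 then
        temp ++ [(PySem.List.pyGet? array (i : Int)).getD 0]
      else temp
    anotherGo array (i + 1) temp'
  else temp
termination_by array.length - i
decreasing_by omega

def another (array : List Int) : List Int :=
  anotherGo array 0 []

-- ===== PORT B =====
-- pass 1: running maximum of array[:-1] (m = None initially)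
def runMax (xs : List Int) (m : Option Int) : List Int :=
  match xs with
  | [] => []
  | x :: rest =>
    let m' := match m with
      | none => x
      | some mv => if x > mv then x else mv
    m' :: runMax rest (some m')

-- pass 2: keep v when it is the first element or differs from its predecessor
def changePts (r : List Int) (prev : Option Int) : List Int :=
  match r with
  | [] => []
  | v :: rest =>
    match prev with
    | none => v :: changePts rest (some v)
    | some p => if v ≠ p then v :: changePts rest (some v) else changePts rest (some v)

def another_alt (array : List Int) : List Int :=
  changePts (runMax (PySem.List.slice array none (some (-1))) none) none

-- ===== PRECONDITION & SPEC =====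
def Spec_another (array : List Int) (out : List Int) : Prop := out = another_alt array
instance (array : List Int) (out : List Int) : Decidable (Spec_another array out) := by unfold Spec_another; infer_instance

-- ===== CLAIM (what is proved, stated in full; the proofs are below) =====
def Claim_equal_another : Prop := ∀ (array : List Int), Dom_another array → Spec_another array (another array)

-- ===== LEMMAS AND PROOFS =====

-- A's loop restated as structural recursion over the remaining prefix elements
def recA (temp : List Int) (xs : List Int) : List Int :=
  match xs with
  | [] => temp
  | x :: rest =>
    recA (if temp.length = 0 then temp ++ [x]
          else if x > (PySem.List.pyGet? temp (-1)).getD 0 then temp ++ [x]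
          else temp) rest

theorem anotherGo_eq_recA (array : List Int) (i : Nat) (temp : List Int) :
    anotherGo array i temp = recA temp (array.dropLast.drop i) := by
  induction i, temp using anotherGo.induct array with
  | case1 i temp h temp' ih =>
    have hlen : i < array.dropLast.length := by
      simp only [List.length_dropLast]; omega
    have hdrop : array.dropLast.drop i = array.dropLast[i] :: array.dropLast.drop (i + 1) :=
      List.drop_eq_getElem_cons hlen
    have hget : (PySem.List.pyGet? array (i : Int)).getD 0 = array.dropLast[i] := by
      rw [PySem.List.pyGet?_natCast]
      have : i < array.length := by omega
      simp [List.getElem?_eq_getElem this, List.getElem_dropLast]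
    rw [anotherGo, dif_pos h]
    simp only [temp', dite_eq_ite] at ih
    rw [ih, hdrop, recA]
    simp only [hget]
  | case2 i temp h =>
    have : array.dropLast.drop i = [] := by
      apply List.drop_eq_nil_of_le
      simp only [List.length_dropLast]; omega
    rw [anotherGo, dif_neg h, this, recA]

theorem recA_invariant (xs : List Int) (temp : List Int) (m : Int)
    (hne : temp ≠ []) (hlast : temp.getLast? = some m) :
    recA temp xs = temp ++ changePts (runMax xs (some m)) (some m) := by
  induction xs generalizing temp m with
  | nil => simp [recA, runMax, changePts]
  | cons x rest ih =>
    have hlen : ¬ temp.length = 0 := by simpa [List.length_eq_zero_iff] using hne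
    have hget : (PySem.List.pyGet? temp (-1)).getD 0 = m := by
      rw [PySem.List.pyGet?_neg_one, hlast]; rfl
    rw [recA, runMax, changePts]
    simp only [hlen, if_false, hget]
    by_cases hx : x > m
    · have hne' : temp ++ [x] ≠ [] := by simp
      have hlast' : (temp ++ [x]).getLast? = some x := by simp
      rw [if_pos hx, ih (temp ++ [x]) x hne' hlast']
      have hxm : x ≠ m := by omega
      simp [hx, hxm]
    · have hm' : (if x > m then x else m) = m := by simp [hx]
      rw [if_neg hx, ih temp m hne hlast]
      simp [hm']

theorem recA_nil (xs : List Int) :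
    recA [] xs = changePts (runMax xs none) none := by
  cases xs with
  | nil => simp [recA, runMax, changePts]
  | cons x rest =>
    rw [recA, runMax, changePts]
    simp only [List.length_nil, List.nil_append]
    exact recA_invariant rest [x] x (by simp) (by simp)

-- ===== VERDICT (by name: the statement is the Claim_ definition above) =====
theorem another_spec : Claim_equal_another := by
  intro array _
  unfold Spec_another another another_alt
  rw [anotherGo_eq_recA, List.drop_zero, PySem.List.slice_to_neg_one]
  exact recA_nil _
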